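-- pv_equiv track=rewrite | github.com/Francepnadeau/Final_Project_2017 | Implementations/Recurrence_Touzet_v1.py | encod_letters
-- ===== SOURCE A (Python) =====
-- def encod_letters(Sigma,P,K_dist):
--     P_prime='$'*K_dist + P + '$'*(2*K_dist)  #We create P', which includes $'s before and after P.
--     bit_vector=[]
--     transition = []
--     final=[None]*(len(P_prime)-2*K_dist)
--
--     for i in range(len(P_prime)-2*K_dist):  #Initialising  the lists.
--         final[i]=[]
--
--     for letter in Sigma:  #Construct all possible bit vectors for each letter of the alphabet.
--         bit = ''
--         for i in range(len(P_prime)):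
--             if letter == P_prime[i]:  #A '1' corresponds to a match of letters.
--                 bit += '1'
--             else:
--                 bit += '0'  #A '0' is any other letter.
--         bit_vector.append(bit)  # We append each bit vector create by the letters.
--
--     for vector in bit_vector: #Dividing every vector in substrings of length 2(K_dist)+1.
--         for j in range(len(P_prime)-2*K_dist):
--             if vector[j:j+2*K_dist+1] not in final[j]:
--                 final[j].append(vector[j:j+2*K_dist+1])
--
--     return(final)
-- ===== SOURCE B (Python) =====
-- def encod_letters(Sigma, P, K_dist):
--     P_prime = '$'*K_dist + P + '$'*(2*K_dist)
--     w = 2*K_dist + 1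
--     tables = {letter: {ord(c): '1' if c == letter else '0' for c in set(P_prime)}
--               for letter in Sigma}
--     final = []
--     for j in range(len(P_prime) - 2*K_dist):
--         window = P_prime[j:j+w]
--         seen = []
--         for letter in Sigma:
--             s = window.translate(tables[letter])
--             if s not in seen:
--                 seen.append(s)
--         final.append(seen)
--     return final
-- ===== Notes on version B (the rewrite author's own statement) =====
-- stated objective: alternative
-- what changed: B is position-major: for each position j it slices the window P_prime[j:j+2K+1] once and marks it per letter with a precomputed str.translate table, eliminating A's intermediate table of full-length per-letter bit vectors and its separate slicing pass.
import Mathlib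
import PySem

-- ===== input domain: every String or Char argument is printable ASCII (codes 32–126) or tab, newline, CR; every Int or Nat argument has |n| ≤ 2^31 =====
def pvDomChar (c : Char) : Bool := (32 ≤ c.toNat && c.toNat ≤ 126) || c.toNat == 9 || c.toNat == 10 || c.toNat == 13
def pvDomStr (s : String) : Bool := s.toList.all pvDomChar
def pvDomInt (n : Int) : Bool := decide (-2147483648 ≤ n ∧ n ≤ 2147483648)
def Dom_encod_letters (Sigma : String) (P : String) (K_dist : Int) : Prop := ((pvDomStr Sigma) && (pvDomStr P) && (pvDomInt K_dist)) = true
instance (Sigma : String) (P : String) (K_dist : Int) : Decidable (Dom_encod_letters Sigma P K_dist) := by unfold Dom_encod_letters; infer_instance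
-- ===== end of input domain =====

-- B is position-major: for each position it slices the window of P_prime and marks it per letter
-- via a translation table, dropping A's intermediate table of full-length bit vectors (alternative decomposition).

-- ===== PORT A =====
def encod_letters (Sigma : String) (P : String) (K_dist : Int) : List (List String) :=
  let Pp : List Char := List.replicate K_dist.toNat '$' ++ P.toList ++ List.replicate (2*K_dist).toNat '$'
  let m : Int := (Pp.length : Int) - 2*K_dist
  let final0 : List (List String) := (PySem.List.pyRange 0 m 1).map (fun _ => ([] : List String))
  let bit_vector : List (List Char) :=
    Sigma.toList.foldl (fun acc letter =>
      acc ++ [(PySem.List.pyRange 0 (Pp.length : Int) 1).foldl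
        (fun bit i => bit ++ [if some letter = PySem.List.pyGet? Pp i then '1' else '0']) []]) []
  bit_vector.foldl (fun fin vector =>
    (PySem.List.pyRange 0 m 1).foldl (fun fin j =>
      let s : String := String.ofList (PySem.List.slice vector (some j) (some (j + 2*K_dist + 1)))
      let cur := fin.getD j.toNat []
      if s ∈ cur then fin else fin.set j.toNat (cur ++ [s])) fin) final0

-- ===== PORT B =====
def encod_letters_alt (Sigma : String) (P : String) (K_dist : Int) : List (List String) :=
  let Pp : List Char := List.replicate K_dist.toNat '$' ++ P.toList ++ List.replicate (2*K_dist).toNat '$'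
  let w : Int := 2*K_dist + 1
  (PySem.List.pyRange 0 ((Pp.length : Int) - 2*K_dist) 1).map (fun j =>
    let window : List Char := PySem.List.slice Pp (some j) (some (j + w))
    Sigma.toList.foldl (fun seen letter =>
      -- window.translate(tables[letter]): tables[letter] maps every char of P_prime (hence of window)
      -- to '1' iff it equals letter, else '0'; ported exactly as that total character map.
      let s : String := String.ofList (window.map (fun c => if c = letter then '1' else '0'))
      if s ∈ seen then seen else seen ++ [s]) [])

-- ===== PRECONDITION & SPEC =====
def Spec_encod_letters (Sigma : String) (P : String) (K_dist : Int) (out : List (List String)) : Prop := out = encod_letters_alt Sigma P K_dist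
instance (Sigma : String) (P : String) (K_dist : Int) (out : List (List String)) : Decidable (Spec_encod_letters Sigma P K_dist out) := by unfold Spec_encod_letters; infer_instance

-- ===== CLAIM (what is proved, stated in full; the proofs are below) =====
def Claim_equal_encod_letters : Prop := ∀ (Sigma : String) (P : String) (K_dist : Int), Dom_encod_letters Sigma P K_dist → Spec_encod_letters Sigma P K_dist (encod_letters Sigma P K_dist)

-- ===== LEMMAS AND PROOFS =====

-- A's inner pass over positions, abstracted: slot k receives the value s k if not already present.
def pvStep (s : Nat → String) (f : List (List String)) (k : Nat) : List (List String) :=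
  if s k ∈ f.getD k [] then f else f.set k (f.getD k [] ++ [s k])

theorem pvStep_length (s : Nat → String) (f : List (List String)) (k : Nat) :
    (pvStep s f k).length = f.length := by
  unfold pvStep; split <;> simp

theorem pvFold_length (s : Nat → String) (js : List Nat) (f : List (List String)) :
    (js.foldl (pvStep s) f).length = f.length := by
  induction js generalizing f with
  | nil => rfl
  | cons a as ih => simp [List.foldl_cons, ih, pvStep_length]

theorem pvStep_untouched (s : Nat → String) (f : List (List String)) (k j : Nat) (h : j ≠ k) :
    (pvStep s f k).getD j [] = f.getD j [] := by
  unfold pvStep; split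
  · rfl
  · simp [List.getD_eq_getElem?_getD, List.getElem?_set_ne (Ne.symm h)]

theorem pvFold_untouched (s : Nat → String) (js : List Nat) (f : List (List String)) (j : Nat)
    (h : j ∉ js) : (js.foldl (pvStep s) f).getD j [] = f.getD j [] := by
  induction js generalizing f with
  | nil => rfl
  | cons a as ih =>
    simp only [List.foldl_cons]
    rw [ih _ (fun hm => h (List.mem_cons_of_mem _ hm)),
        pvStep_untouched _ _ _ _ (fun hj => h (by rw [hj]; exact List.mem_cons_self))]

theorem pvFold_touched (s : Nat → String) (js : List Nat) (f : List (List String)) (j : Nat)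
    (hnd : js.Nodup) (hj : j ∈ js) (hlt : j < f.length) :
    (js.foldl (pvStep s) f).getD j [] =
      (if s j ∈ f.getD j [] then f.getD j [] else f.getD j [] ++ [s j]) := by
  induction js generalizing f with
  | nil => cases hj
  | cons a as ih =>
    simp only [List.foldl_cons]
    rcases List.mem_cons.mp hj with rfl | hmem
    · have hnotin : j ∉ as := (List.nodup_cons.mp hnd).1
      rw [pvFold_untouched _ _ _ _ hnotin]
      unfold pvStep
      split
      · rfl
      · simp [List.getD_eq_getElem?_getD, hlt]
    · have hne : j ≠ a := fun h => (List.nodup_cons.mp hnd).1 (h ▸ hmem)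
      rw [ih _ (List.nodup_cons.mp hnd).2 hmem (by rw [pvStep_length]; exact hlt),
          pvStep_untouched _ _ _ _ hne]

theorem pvOuter {β : Type} (vs : List β) (sl : β → Nat → String) (N : Nat)
    (fin : List (List String)) (hlen : fin.length = N) (j : Nat) (hj : j < N) :
    (vs.foldl (fun f v => (List.range N).foldl (pvStep (sl v)) f) fin).getD j [] =
      vs.foldl (fun cur v => if sl v j ∈ cur then cur else cur ++ [sl v j]) (fin.getD j []) := by
  induction vs generalizing fin with
  | nil => rfl
  | cons v vs ih =>
    simp only [List.foldl_cons]
    rw [ih _ (by rw [pvFold_length]; exact hlen),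
        pvFold_touched _ _ _ _ (List.nodup_range) (List.mem_range.mpr hj) (hlen ▸ hj)]

theorem pvOuter_length {β : Type} (vs : List β) (sl : β → Nat → String) (N : Nat)
    (fin : List (List String)) :
    (vs.foldl (fun f v => (List.range N).foldl (pvStep (sl v)) f) fin).length = fin.length := by
  induction vs generalizing fin with
  | nil => rfl
  | cons v vs ih => simp only [List.foldl_cons]; rw [ih, pvFold_length]

-- loop interchange, raw-lambda form matching the ports
theorem pvAB {β : Type} (vs : List β) (N : Nat) (sl : β → Nat → String) :
    List.foldl (fun fin v => List.foldl (fun x y =>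
        if sl v y ∈ x.getD y [] then x else x.set y (x.getD y [] ++ [sl v y])) fin (List.range N))
      (List.map (fun _ => ([] : List String)) (List.range N)) vs
    = List.map (fun j => List.foldl (fun cur v =>
        if sl v j ∈ cur then cur else cur ++ [sl v j]) [] vs) (List.range N) := by
  show List.foldl (fun fin v => (List.range N).foldl (pvStep (sl v)) fin)
      (List.map (fun _ => ([] : List String)) (List.range N)) vs = _
  apply List.ext_getElem
  · rw [pvOuter_length]; simp
  · intro j h1 h2
    have hj : j < N := by simpa using h2
    have hlen : (List.map (fun _ => ([] : List String)) (List.range N)).length = N := by simp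
    rw [← List.getD_eq_getElem _ [] h1, pvOuter _ _ _ _ hlen _ hj]
    have h0 : (List.map (fun _ => ([] : List String)) (List.range N)).getD j [] = [] := by
      rw [List.getD_eq_getElem _ [] (by simpa using hj)]; simp
    rw [h0]
    simp

-- slicing commutes with a per-character map
theorem pvSliceMap {α γ : Type} (l : List α) (f : α → γ) (a b : Int) :
    PySem.List.slice (l.map f) (some a) (some b) = (PySem.List.slice l (some a) (some b)).map f := by
  unfold PySem.List.slice PySem.List.clampIdx
  simp [List.map_drop, List.map_take]

-- a letter's full bit vector is the character map of P_prime itself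
theorem pvBitvEqMap (Pp : List Char) (letter : Char) :
    (List.range Pp.length).map (fun i : Nat => if some letter = PySem.List.pyGet? Pp (i:Int) then '1' else '0')
      = Pp.map (fun c => if c = letter then '1' else '0') := by
  apply List.ext_getElem
  · simp
  · intro i h1 h2
    have hi : i < Pp.length := by simpa using h1
    simp only [List.getElem_map, List.getElem_range, PySem.List.pyGet?_natCast,
      List.getElem?_eq_getElem hi, Option.some.injEq]
    simp [eq_comm]

theorem pv_main (Sigma P : String) (K_dist : Int) :
    encod_letters Sigma P K_dist = encod_letters_alt Sigma P K_dist := by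
  simp only [encod_letters, encod_letters_alt]
  set Pp : List Char := List.replicate K_dist.toNat '$' ++ P.toList ++ List.replicate (2*K_dist).toNat '$' with hPp
  set L : Nat := Pp.length with hL
  set m : Int := (L:Int) - 2*K_dist with hm
  rw [PySem.List.pyRange_one 0 m, PySem.List.pyRange_one 0 (L:Int)]
  simp only [sub_zero, Int.toNat_natCast, zero_add, List.foldl_map, List.map_map,
    PySem.List.foldl_append_singleton_eq_map, List.nil_append, Function.comp_def]
  rw [pvAB Sigma.toList m.toNat (fun letter k => String.ofList (PySem.List.slice
        ((List.range L).map (fun i : Nat => if some letter = PySem.List.pyGet? Pp (i:Int) then '1' else '0'))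
        (some (k:Int)) (some ((k:Int) + 2*K_dist + 1))))]
  apply List.map_congr_left
  intro k hk
  simp only [add_assoc]
  have key : ∀ letter : Char,
      PySem.List.slice ((List.range L).map (fun i : Nat =>
          if some letter = PySem.List.pyGet? Pp (i:Int) then '1' else '0'))
        (some (k:Int)) (some ((k:Int) + (2*K_dist + 1)))
      = (PySem.List.slice Pp (some (k:Int)) (some ((k:Int) + (2*K_dist + 1)))).map
          (fun c => if c = letter then '1' else '0') := by
    intro letter
    rw [hL, pvBitvEqMap Pp letter, pvSliceMap]
  simp only [key]

-- ===== VERDICT (by name: the statement is the Claim_ definition above) =====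
theorem encod_letters_spec : Claim_equal_encod_letters := by
  intro Sigma P K_dist _hDom
  unfold Spec_encod_letters
  exact pv_main Sigma P K_dist
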